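-- pv_equiv track=rewrite | github.com/hustfc/OJ | PYTHON/腾讯，有趣数字.py | TowTuple
-- ===== SOURCE A (Python) =====
-- def TowTuple(n, a):
--     a.sort()
--     minA, maxA = 1, 1
--     for i in range(1, n):
--         if a[i] == a[0]:
--             minA += 1
--         else:
--             break
--     for i in range(n - 2, - 1, -1):
--         if a[i] == a[n - 1]:
--             maxA += 1
--         else:
--             break
--     ans2 = minA * maxA
--     minDiffer = 1000000
--     ans1 = 0
--     for i in range(1, n):  #找出最小差值
--         differ = a[i] - a[i - 1]
--         if differ < minDiffer:
--             minDiffer = differ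
--     for i in range(0, n):
--         for j in range(i + 1, n):
--             if a[j] - a[i] == minDiffer:
--                 ans1 += 1
--             elif a[j] - a[i] > minDiffer:   #超时的举措，将后面的全部掐掉
--                 break
--     return ans1, ans2
-- ===== SOURCE B (Python) =====
-- def TowTuple(n, a):
--     a.sort()
--     if n < 2:
--         return (0, 1)
--     b = a[:n]
--     ans2 = b.count(b[0]) * b.count(b[-1])
--     gaps = [b[i] - b[i - 1] for i in range(1, n)]
--     m = min(gaps)
--     if m > 0:
--         ans1 = gaps.count(m)
--     else:
--         ans1 = 0
--         i = 0
--         while i < n: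
--             j = i + 1
--             while j < n and b[j] == b[i]:
--                 j += 1
--             c = j - i
--             ans1 += c * (c - 1) // 2
--             i = j
--     return (ans1, ans2)
-- ===== Notes on version B (the rewrite author's own statement) =====
-- stated objective: faster
-- what changed: A counts min-difference pairs with a quadratic double loop over all index pairs; B sorts once and works in a single linear pass over the sorted prefix: adjacent gaps give the minimum difference, min-gap pairs are counted as equal adjacent gaps (or as run-length combinations c*(c-1)/2 when the minimum gap is 0), and the max-difference pair count is count(min)*count(max).
-- intended difference: On inputs whose first n sorted values are pairwise more than 1000000 apart, A's minDiffer stays at its 1000000 sentinel so A returns 0 min-difference pairs, while B returns the actual count of minimum-gap pairs (>= 1), which is the intended value. — e.g. on TowTuple(2, [0, 2000000]): A returns (0, 1), B returns (1, 1)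
import Mathlib
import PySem

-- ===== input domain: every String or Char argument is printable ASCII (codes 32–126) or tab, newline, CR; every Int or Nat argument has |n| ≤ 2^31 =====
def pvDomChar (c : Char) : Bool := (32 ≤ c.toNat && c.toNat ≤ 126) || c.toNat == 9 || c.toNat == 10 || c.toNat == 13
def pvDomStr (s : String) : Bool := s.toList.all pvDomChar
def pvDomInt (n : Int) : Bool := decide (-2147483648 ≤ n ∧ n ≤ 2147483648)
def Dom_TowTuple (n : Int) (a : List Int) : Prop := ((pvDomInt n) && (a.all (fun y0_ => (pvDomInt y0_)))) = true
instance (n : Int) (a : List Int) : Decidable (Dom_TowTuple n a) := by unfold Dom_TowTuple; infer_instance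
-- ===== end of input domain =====

-- B replaces A's quadratic pair scan by one linear pass over the sorted prefix (adjacent gaps /
-- run lengths); equivalence is about the RETURN value only — both Pythons sort `a` in place.

-- ===== PORT A =====
-- 'for i in …: if a[i] == v: cnt += 1 else: break'  (A's first two loops; v is the fixed a[0] / a[n-1])
def pvEqRun (a : List Int) (v : Int) : List Int → Int → Int
  | [], acc => acc
  | i :: rest, acc =>
      if PySem.List.pyGetD a i 0 = v then pvEqRun a v rest (acc + 1) else acc

-- inner 'for j in range(i+1, n)' of A's last loop, with its break
def pvInner (a : List Int) (m xi : Int) : List Int → Int → Int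
  | [], acc => acc
  | j :: rest, acc =>
      if PySem.List.pyGetD a j 0 - PySem.List.pyGetD a xi 0 = m then pvInner a m xi rest (acc + 1)
      else if PySem.List.pyGetD a j 0 - PySem.List.pyGetD a xi 0 > m then acc
      else pvInner a m xi rest acc

def TowTuple (n : Int) (a : List Int) : Int × Int :=
  let a := PySem.List.sorted a (fun x => x) false
  let minA := pvEqRun a (PySem.List.pyGetD a 0 0) (PySem.List.pyRange 1 n 1) 1
  let maxA := pvEqRun a (PySem.List.pyGetD a (n - 1) 0) (PySem.List.pyRange (n - 2) (-1) (-1)) 1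
  let ans2 := minA * maxA
  let minDiffer := (PySem.List.pyRange 1 n 1).foldl
    (fun acc i =>
      let differ := PySem.List.pyGetD a i 0 - PySem.List.pyGetD a (i - 1) 0
      if differ < acc then differ else acc) 1000000
  let ans1 := (PySem.List.pyRange 0 n 1).foldl
    (fun acc i => pvInner a minDiffer i (PySem.List.pyRange (i + 1) n 1) acc) 0
  (ans1, ans2)

-- ===== PORT B =====
-- B's run-counting while loop: each outer step consumes one maximal run of equal values
def pvEqPairs : List Int → Int
  | [] => 0
  | x :: t =>
      let c : Int := 1 + ((t.takeWhile (fun y => y == x)).length : Int)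
      PySem.Int.floordiv (c * (c - 1)) 2 + pvEqPairs (t.dropWhile (fun y => y == x))
  termination_by l => l.length
  decreasing_by
    simp only [List.length_cons]
    exact Nat.lt_succ_of_le (List.length_dropWhile_le _ _)

def TowTuple_alt (n : Int) (a : List Int) : Int × Int :=
  let a := PySem.List.sorted a (fun x => x) false
  if n < 2 then (0, 1) else
    let b := PySem.List.slice a none (some n)
    let ans2 := (b.count (PySem.List.pyGetD b 0 0) : Int) * (b.count (PySem.List.pyGetD b (-1) 0) : Int)
    let gaps := (PySem.List.pyRange 1 n 1).map
      (fun i => PySem.List.pyGetD b i 0 - PySem.List.pyGetD b (i - 1) 0)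
    let m := (PySem.List.min? gaps (fun x => x)).getD 0
    let ans1 := if 0 < m then (gaps.count m : Int) else pvEqPairs b
    (ans1, ans2)

-- ===== PRECONDITION & SPEC =====
-- Pre_ excludes exactly the inputs where A raises IndexError: n ≥ 2 with fewer than n list elements.
def Pre_TowTuple (n : Int) (a : List Int) : Prop := n ≤ (a.length : Int) ∨ n ≤ 1
instance (n : Int) (a : List Int) : Decidable (Pre_TowTuple n a) := by unfold Pre_TowTuple; infer_instance
def pvWitness_TowTuple : Int × List Int := (3, [1, 5, 2])

-- On inputs whose first n sorted values are pairwise more than 1000000 apart, A's minDiffer stays at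
-- its 1000000 sentinel so A returns 0 min-difference pairs, while B returns the actual count of
-- minimum-gap pairs (≥ 1), which is the intended value.
def D_TowTuple (n : Int) (a : List Int) : Prop :=
  2 ≤ n ∧ List.IsChain (fun x y => x + 1000000 < y)
      ((PySem.List.sorted a (fun x => x) false).take n.toNat)
instance (n : Int) (a : List Int) : Decidable (D_TowTuple n a) := by unfold D_TowTuple; infer_instance

def Spec_TowTuple (n : Int) (a : List Int) (out : Int × Int) : Prop := ¬ D_TowTuple n a → out = TowTuple_alt n a
instance (n : Int) (a : List Int) (out : Int × Int) : Decidable (Spec_TowTuple n a out) := by unfold Spec_TowTuple; infer_instance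

def pvDiffWitness_TowTuple : Int × List Int := (2, [0, 2000000])
def pvDiffWitnessOut_TowTuple : (Int × Int) × (Int × Int) := ((0, 1), (1, 1))

-- ===== CLAIM (what is proved, stated in full; the proofs are below) =====
def Claim_unchanged_TowTuple : Prop := ∀ (n : Int) (a : List Int), Dom_TowTuple n a → Pre_TowTuple n a → Spec_TowTuple n a (TowTuple n a)
def Claim_changed_TowTuple : Prop := Dom_TowTuple (pvDiffWitness_TowTuple.1) (pvDiffWitness_TowTuple.2) ∧ Pre_TowTuple (pvDiffWitness_TowTuple.1) (pvDiffWitness_TowTuple.2) ∧ D_TowTuple (pvDiffWitness_TowTuple.1) (pvDiffWitness_TowTuple.2) ∧ TowTuple (pvDiffWitness_TowTuple.1) (pvDiffWitness_TowTuple.2) = pvDiffWitnessOut_TowTuple.1 ∧ TowTuple_alt (pvDiffWitness_TowTuple.1) (pvDiffWitness_TowTuple.2) = pvDiffWitnessOut_TowTuple.2 ∧ pvDiffWitnessOut_TowTuple.1 ≠ pvDiffWitnessOut_TowTuple.2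
def Claim_exact_TowTuple : Prop := ∀ (n : Int) (a : List Int), Dom_TowTuple n a → Pre_TowTuple n a → D_TowTuple n a → TowTuple n a ≠ TowTuple_alt n a

-- ===== LEMMAS AND PROOFS =====

theorem pvGetD_nat (l : List Int) (k : Nat) (h : k < l.length) :
    PySem.List.pyGetD l (k : Int) 0 = l[k] := by
  rw [PySem.List.pyGetD_natCast]
  exact List.getD_eq_getElem l 0 h

theorem pvGetD_take (s : List Int) (N : Nat) (i : Int) (h0 : 0 ≤ i) (h1 : i < (N : Int))
    (hN : N ≤ s.length) :
    PySem.List.pyGetD (s.take N) i 0 = PySem.List.pyGetD s i 0 := by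
  obtain ⟨k, rfl⟩ : ∃ k : Nat, i = (k : Int) := ⟨i.toNat, by omega⟩
  have hk : k < N := by exact_mod_cast h1
  rw [pvGetD_nat (s.take N) k (by rw [List.length_take]; omega),
      pvGetD_nat s k (by omega), List.getElem_take]

theorem pvGetD_neg_one (l : List Int) (h : 0 < l.length) :
    PySem.List.pyGetD l (-1) 0 = l[l.length - 1]'(by omega) := by
  simp [PySem.List.pyGetD, PySem.List.pyGet?, PySem.List.pyIdx?]
  rw [if_pos (by omega : 1 ≤ l.length)]
  simp [List.getElem?_eq_getElem (show l.length - 1 < l.length by omega)]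

theorem pvEqRun_congr (s b : List Int) (v : Int) :
    ∀ (L : List Int) (acc : Int),
      (∀ i ∈ L, PySem.List.pyGetD s i 0 = PySem.List.pyGetD b i 0) →
      pvEqRun s v L acc = pvEqRun b v L acc
  | [], _, _ => rfl
  | i :: rest, acc, h => by
      simp only [pvEqRun, h i (by simp)]
      split
      · exact pvEqRun_congr s b v rest (acc + 1) (fun j hj => h j (by simp [hj]))
      · rfl

theorem pvInner_congr (s b : List Int) (m xi : Int)
    (hxi : PySem.List.pyGetD s xi 0 = PySem.List.pyGetD b xi 0) :
    ∀ (L : List Int) (acc : Int),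
      (∀ j ∈ L, PySem.List.pyGetD s j 0 = PySem.List.pyGetD b j 0) →
      pvInner s m xi L acc = pvInner b m xi L acc
  | [], _, _ => rfl
  | j :: rest, acc, h => by
      simp only [pvInner, h j (by simp), hxi]
      split
      · exact pvInner_congr s b m xi hxi rest (acc + 1) (fun j hj => h j (by simp [hj]))
      · split
        · rfl
        · exact pvInner_congr s b m xi hxi rest acc (fun j hj => h j (by simp [hj]))

theorem pvEqRun_fwd (b : List Int) (v : Int) :
    ∀ (d k : Nat) (acc : Int), k + d = b.length →
      pvEqRun b v (PySem.List.pyRange (k : Int) (b.length : Int) 1) acc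
        = acc + (((b.drop k).takeWhile (fun y => y == v)).length : Int) := by
  intro d
  induction d with
  | zero =>
      intro k acc h
      rw [PySem.List.pyRange_one_eq_nil (by omega)]
      rw [List.drop_eq_nil_of_le (by omega)]
      simp [pvEqRun]
  | succ d ih =>
      intro k acc h
      have hk : k < b.length := by omega
      rw [PySem.List.pyRange_one_cons (by exact_mod_cast hk)]
      rw [show ((k : Int) + 1) = ((k + 1 : Nat) : Int) by push_cast; ring]
      rw [← List.getElem_cons_drop hk]
      simp only [pvEqRun, List.takeWhile_cons]
      rw [pvGetD_nat b k hk]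
      by_cases hv : b[k] = v
      · rw [if_pos hv, ih (k + 1) (acc + 1) (by omega)]
        simp only [hv, beq_self_eq_true, if_true, List.length_cons]
        push_cast; ring
      · rw [if_neg hv]
        simp [hv]

theorem pvEqRun_bwd (b : List Int) (v : Int) :
    ∀ (k : Nat) (acc : Int), k < b.length →
      pvEqRun b v (PySem.List.pyRange (k : Int) (-1) (-1)) acc
        = acc + ((((b.take (k + 1)).reverse).takeWhile (fun y => y == v)).length : Int) := by
  intro k
  induction k with
  | zero =>
      intro acc hk
      rw [show ((0 : Nat) : Int) = (0 : Int) by norm_num]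
      rw [PySem.List.pyRange_neg_one_cons (by norm_num)]
      rw [show (0 : Int) - 1 = -1 by ring]
      rw [PySem.List.pyRange_neg_one_eq_nil (by norm_num)]
      have ht : b.take 1 = [b[0]'hk] := by
        have := List.take_concat_get (l := b) (i := 0) hk
        simpa using this.symm
      simp only [pvEqRun, ht]
      have h0 : PySem.List.pyGetD b 0 0 = b[0]'hk := by
        have := pvGetD_nat b 0 hk
        simpa using this
      rw [h0]
      by_cases hv : b[0]'hk = v <;> simp [hv]
  | succ k ih =>
      intro acc hk
      have hk' : k < b.length := by omega
      rw [PySem.List.pyRange_neg_one_cons (by push_cast; omega)]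
      rw [show ((k + 1 : Nat) : Int) - 1 = ((k : Nat) : Int) by push_cast; ring]
      have ht : b.take (k + 1 + 1) = (b.take (k + 1)).concat (b[k + 1]'hk) :=
        (List.take_concat_get hk).symm
      simp only [pvEqRun]
      rw [pvGetD_nat b (k + 1) hk]
      by_cases hv : b[k + 1]'hk = v
      · rw [if_pos hv, ih (acc + 1) hk', ht]
        simp only [List.concat_eq_append, List.reverse_append, List.reverse_cons,
          List.reverse_nil, List.nil_append, List.singleton_append, List.takeWhile_cons,
          hv, beq_self_eq_true, if_true, List.length_cons]
        push_cast; ring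
      · rw [if_neg hv, ht]
        simp only [List.concat_eq_append, List.reverse_append, List.reverse_cons,
          List.reverse_nil, List.nil_append, List.singleton_append, List.takeWhile_cons]
        rw [if_neg (by simp [hv])]
        simp

theorem pvCount_run_le (x : Int) :
    ∀ (t : List Int), t.Pairwise (· ≤ ·) → (∀ y ∈ t, x ≤ y) →
      t.count x = (t.takeWhile (fun y => y == x)).length := by
  intro t
  induction t with
  | nil => simp
  | cons y t ih =>
      intro hp hx
      rw [List.pairwise_cons] at hp
      by_cases hxy : y = x
      · subst hxy
        rw [List.count_cons_self, List.takeWhile_cons]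
        simp only [beq_self_eq_true, if_true, List.length_cons]
        rw [ih hp.2 (fun z hz => hx z (by simp [hz]))]
      · have hlt : x < y := lt_of_le_of_ne (hx y (by simp)) (Ne.symm hxy)
        have hz : t.count x = 0 := List.count_eq_zero.mpr (by
          intro hmem
          have := hp.1 x hmem
          omega)
        rw [List.takeWhile_cons, if_neg (by simp [hxy]), List.count_cons]
        simp [hz, hxy]

theorem pvCount_run_ge (x : Int) :
    ∀ (t : List Int), t.Pairwise (fun a b => b ≤ a) → (∀ y ∈ t, y ≤ x) →
      t.count x = (t.takeWhile (fun y => y == x)).length := by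
  intro t
  induction t with
  | nil => simp
  | cons y t ih =>
      intro hp hx
      rw [List.pairwise_cons] at hp
      by_cases hxy : y = x
      · subst hxy
        rw [List.count_cons_self, List.takeWhile_cons]
        simp only [beq_self_eq_true, if_true, List.length_cons]
        rw [ih hp.2 (fun z hz => hx z (by simp [hz]))]
      · have hlt : y < x := lt_of_le_of_ne (hx y (by simp)) hxy
        have hz : t.count x = 0 := List.count_eq_zero.mpr (by
          intro hmem
          have := hp.1 x hmem
          omega)
        rw [List.takeWhile_cons, if_neg (by simp [hxy]), List.count_cons]
        simp [hz, hxy]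

def pvDiffs (x : Int) : List Int → List Int
  | [] => []
  | y :: t => (y - x) :: pvDiffs y t

def pvPairCount (m : Int) : List Int → Int
  | [] => 0
  | x :: t => ((t.countP (fun y => y - x == m)) : Int) + pvPairCount m t

theorem pvMap_range_diffs (b : List Int) :
    ∀ (d k : Nat) (hk : k < b.length), k + 1 + d = b.length →
      (PySem.List.pyRange ((k : Int) + 1) (b.length : Int) 1).map
          (fun i => PySem.List.pyGetD b i 0 - PySem.List.pyGetD b (i - 1) 0)
        = pvDiffs (b[k]'hk) (b.drop (k + 1)) := by
  intro d
  induction d with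
  | zero =>
      intro k hk h
      rw [PySem.List.pyRange_one_eq_nil (by omega)]
      rw [List.drop_eq_nil_of_le (by omega)]
      simp [pvDiffs]
  | succ d ih =>
      intro k hk h
      have hk1 : k + 1 < b.length := by omega
      rw [PySem.List.pyRange_one_cons (by omega)]
      rw [List.map_cons]
      rw [show ((k : Int) + 1) = ((k + 1 : Nat) : Int) by push_cast; ring]
      rw [← List.getElem_cons_drop hk1]
      simp only [pvDiffs]
      congr 1
      · rw [pvGetD_nat b (k + 1) hk1,
          show ((k + 1 : Nat) : Int) - 1 = ((k : Nat) : Int) by push_cast; ring,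
          pvGetD_nat b k hk]
      · exact ih (k + 1) hk1 (by omega)

theorem pvChain_iff :
    ∀ (t : List Int) (x : Int),
      List.IsChain (fun p q => p + 1000000 < q) (x :: t) ↔ ∀ g ∈ pvDiffs x t, 1000000 < g := by
  intro t
  induction t with
  | nil => intro x; simp [pvDiffs]
  | cons y t ih =>
      intro x
      rw [List.isChain_cons_cons]
      constructor
      · rintro ⟨h1, h2⟩ g hg
        rcases (by simpa [pvDiffs] using hg : g = y - x ∨ g ∈ pvDiffs y t) with rfl | hg'
        · omega
        · exact (ih y).mp h2 g hg'
      · intro h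
        refine ⟨by have := h (y - x) (by simp [pvDiffs]); omega, (ih y).mpr ?_⟩
        intro g hg
        exact h g (by simp [pvDiffs, hg])

theorem pvDiffs_nonneg :
    ∀ (t : List Int) (x : Int), (x :: t).Pairwise (· ≤ ·) → ∀ g ∈ pvDiffs x t, 0 ≤ g := by
  intro t
  induction t with
  | nil => intro x _ g hg; simp [pvDiffs] at hg
  | cons y t ih =>
      intro x hp g hg
      rw [List.pairwise_cons] at hp
      rcases (by simpa [pvDiffs] using hg : g = y - x ∨ g ∈ pvDiffs y t) with rfl | hg'
      · have := hp.1 y (by simp); omega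
      · exact ih y hp.2 g hg'

theorem pvDiffs_ge (m : Int) (hm : 0 ≤ m) :
    ∀ (t : List Int) (x : Int), (∀ g ∈ pvDiffs x t, m ≤ g) → ∀ z ∈ t, x + m ≤ z := by
  intro t
  induction t with
  | nil => intro x _ z hz; simp at hz
  | cons y t ih =>
      intro x h z hz
      have hxy : m ≤ y - x := h (y - x) (by simp [pvDiffs])
      rcases List.mem_cons.mp hz with rfl | hz'
      · omega
      · have := ih y (fun g hg => h g (by simp [pvDiffs, hg])) z hz'
        omega

theorem pvInner_char (b : List Int) (m xi : Int) :
    ∀ (d j : Nat) (acc : Int), j + d = b.length → (b.drop j).Pairwise (· ≤ ·) →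
      pvInner b m xi (PySem.List.pyRange (j : Int) (b.length : Int) 1) acc
        = acc + ((b.drop j).countP (fun y => y - PySem.List.pyGetD b xi 0 == m) : Int) := by
  intro d
  induction d with
  | zero =>
      intro j acc h _
      rw [PySem.List.pyRange_one_eq_nil (by omega)]
      rw [List.drop_eq_nil_of_le (by omega)]
      simp [pvInner]
  | succ d ih =>
      intro j acc h hp
      have hj : j < b.length := by omega
      have hdj : b.drop j = b[j]'hj :: b.drop (j + 1) := (List.getElem_cons_drop hj).symm
      rw [PySem.List.pyRange_one_cons (by exact_mod_cast hj)]
      simp only [pvInner]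
      rw [pvGetD_nat b j hj]
      rw [hdj] at hp
      rw [List.pairwise_cons] at hp
      rw [show ((j : Int) + 1) = ((j + 1 : Nat) : Int) by push_cast; ring]
      by_cases h1 : b[j]'hj - PySem.List.pyGetD b xi 0 = m
      · rw [if_pos h1, ih (j + 1) (acc + 1) (by omega) hp.2]
        conv_rhs => rw [hdj]
        rw [List.countP_cons]
        simp only [h1, beq_self_eq_true, if_true]
        push_cast; ring
      · rw [if_neg h1]
        by_cases h2 : b[j]'hj - PySem.List.pyGetD b xi 0 > m
        · rw [if_pos h2]
          have hz : (b.drop j).countP (fun y => y - PySem.List.pyGetD b xi 0 == m) = 0 := by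
            rw [List.countP_eq_zero]
            intro z hzm
            rw [hdj] at hzm
            rcases List.mem_cons.mp hzm with rfl | hz'
            · simp only [beq_iff_eq]; omega
            · have := hp.1 z hz'
              simp only [beq_iff_eq]; omega
          rw [hz]; simp
        · rw [if_neg h2, ih (j + 1) acc (by omega) hp.2]
          conv_rhs => rw [hdj]
          rw [List.countP_cons]
          simp [h1]

theorem pvOuter_char (b : List Int) (m : Int) (hp : b.Pairwise (· ≤ ·)) :
    ∀ (d j : Nat) (acc : Int), j + d = b.length →
      List.foldl (fun acc i => pvInner b m i (PySem.List.pyRange (i + 1) (b.length : Int) 1) acc)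
          acc (PySem.List.pyRange (j : Int) (b.length : Int) 1)
        = acc + pvPairCount m (b.drop j) := by
  intro d
  induction d with
  | zero =>
      intro j acc h
      rw [PySem.List.pyRange_one_eq_nil (by omega)]
      rw [List.drop_eq_nil_of_le (by omega)]
      simp [pvPairCount]
  | succ d ih =>
      intro j acc h
      have hj : j < b.length := by omega
      rw [PySem.List.pyRange_one_cons (by exact_mod_cast hj)]
      rw [List.foldl_cons]
      rw [show ((j : Int) + 1) = ((j + 1 : Nat) : Int) by push_cast; ring]
      rw [pvInner_char b m ((j : Nat) : Int) (b.length - (j + 1)) (j + 1) acc (by omega)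
        (List.Pairwise.sublist (List.drop_sublist _ _) hp)]
      rw [ih (j + 1) _ (by omega)]
      have hdj : b.drop j = b[j]'hj :: b.drop (j + 1) := (List.getElem_cons_drop hj).symm
      conv_rhs => rw [hdj]
      simp only [pvPairCount]
      rw [pvGetD_nat b j hj]
      ring

theorem pvPairCount_pos (m : Int) (hm : 0 < m) :
    ∀ (t : List Int) (x : Int), (∀ g ∈ pvDiffs x t, m ≤ g) →
      pvPairCount m (x :: t) = ((pvDiffs x t).count m : Int) := by
  intro t
  induction t with
  | nil => intro x _; simp [pvPairCount, pvDiffs]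
  | cons y t ih =>
      intro x h
      have h1 : m ≤ y - x := h _ (by simp [pvDiffs])
      have hzge : ∀ z ∈ t, y + m ≤ z :=
        pvDiffs_ge m (le_of_lt hm) t y (fun g hg => h g (by simp [pvDiffs, hg]))
      have hct : t.countP (fun z => z - x == m) = 0 := by
        rw [List.countP_eq_zero]
        intro z hzt
        have := hzge z hzt
        simp only [beq_iff_eq]; omega
      show ((y :: t).countP (fun z => z - x == m) : Int) + pvPairCount m (y :: t)
        = ((pvDiffs x (y :: t)).count m : Int)
      rw [ih y (fun g hg => h g (by simp [pvDiffs, hg]))]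
      simp only [pvDiffs, List.count_cons, List.countP_cons, hct]
      by_cases he : y - x = m
      · simp only [he, beq_self_eq_true, if_true]
        push_cast; ring
      · simp only [beq_iff_eq, he, if_false]
        push_cast; ring

theorem pvPairCount_repl (x : Int) :
    ∀ (k : Nat) (d : List Int), d.count x = 0 →
      pvPairCount 0 (List.replicate k x ++ d)
        = ((k.choose 2 : Nat) : Int) + pvPairCount 0 d := by
  intro k
  induction k with
  | zero => intro d hd; simp
  | succ k ih =>
      intro d hd
      rw [List.replicate_succ, List.cons_append]
      show ((List.replicate k x ++ d).countP (fun y => y - x == 0) : Int)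
          + pvPairCount 0 (List.replicate k x ++ d)
        = (((k + 1).choose 2 : Nat) : Int) + pvPairCount 0 d
      rw [ih d hd]
      have hcp : (List.replicate k x ++ d).countP (fun y => y - x == 0) = k := by
        rw [List.countP_append]
        have h1 : (List.replicate k x).countP (fun y => y - x == 0) = k := by
          have := List.countP_eq_length (l := List.replicate k x) (p := fun y => y - x == 0)
          rw [this.mpr (by intro z hz; rw [List.eq_of_mem_replicate hz]; simp)]
          simp
        have h2 : d.countP (fun y => y - x == 0) = 0 := by
          rw [List.countP_eq_zero]
          intro z hz
          have hxz : x ∉ d := List.count_eq_zero.mp hd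
          have : z ≠ x := fun e => hxz (e ▸ hz)
          simp only [beq_iff_eq]; omega
        omega
      rw [hcp]
      have hch : (k + 1).choose 2 = k + k.choose 2 := by
        have := Nat.choose_succ_succ k 1
        simpa [Nat.choose_one_right] using this
      rw [hch]
      push_cast; ring

theorem pvEqPairs_cons (x : Int) (t : List Int) :
    pvEqPairs (x :: t)
      = PySem.Int.floordiv
          ((1 + ((t.takeWhile (fun y => y == x)).length : Int))
            * (1 + ((t.takeWhile (fun y => y == x)).length : Int) - 1)) 2
        + pvEqPairs (t.dropWhile (fun y => y == x)) := by
  rw [pvEqPairs.eq_def]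

theorem pvEqPairs_eq_aux :
    ∀ (fuel : Nat) (l : List Int), l.length ≤ fuel → l.Pairwise (· ≤ ·) →
      pvPairCount 0 l = pvEqPairs l := by
  intro fuel
  induction fuel with
  | zero =>
      intro l h _
      have : l = [] := List.eq_nil_of_length_eq_zero (by omega)
      subst this
      simp [pvPairCount, pvEqPairs]
  | succ fuel ih =>
      intro l hlen hp
      cases l with
      | nil => simp [pvPairCount, pvEqPairs]
      | cons x t =>
        have hxt : ∀ z ∈ t, x ≤ z := (List.pairwise_cons.mp hp).1
        have hpt : t.Pairwise (· ≤ ·) := (List.pairwise_cons.mp hp).2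
        have hrep : t.takeWhile (fun y => y == x)
            = List.replicate (t.takeWhile (fun y => y == x)).length x :=
          List.eq_replicate_of_mem (fun z hz => by
            have := List.mem_takeWhile_imp hz; simpa using this)
        have hdw_pair : (t.dropWhile (fun y => y == x)).Pairwise (· ≤ ·) :=
          List.Pairwise.sublist (List.dropWhile_sublist _) hpt
        have hdcount : (t.dropWhile (fun y => y == x)).count x = 0 := by
          rw [List.count_eq_zero]
          intro hmem
          cases hdw : t.dropWhile (fun y => y == x) with
          | nil => rw [hdw] at hmem; simp at hmem
          | cons y r =>
            have hhead := List.head_dropWhile_not (fun z => z == x) (l := t) (by rw [hdw]; simp)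
            simp only [hdw, List.head_cons] at hhead
            have hyne : y ≠ x := by simpa using hhead
            have hymem : y ∈ t := List.Sublist.mem (by rw [hdw]; simp) (List.dropWhile_sublist _)
            have hxy : x < y := lt_of_le_of_ne (hxt y hymem) (Ne.symm hyne)
            have hpdw := hdw_pair
            rw [hdw, List.pairwise_cons] at hpdw
            rw [hdw] at hmem
            rcases List.mem_cons.mp hmem with rfl | hmem'
            · omega
            · have := hpdw.1 x hmem'
              omega
        have hx : x :: t
            = List.replicate ((t.takeWhile (fun y => y == x)).length + 1) x
              ++ t.dropWhile (fun y => y == x) := by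
          rw [List.replicate_succ, List.cons_append, ← hrep,
            List.takeWhile_append_dropWhile]
        conv_lhs => rw [hx]
        rw [pvPairCount_repl x _ _ hdcount]
        have hdw_len : (t.dropWhile (fun y => y == x)).length ≤ fuel := by
          have := List.length_dropWhile_le (fun y => y == x) t
          simp only [List.length_cons] at hlen
          omega
        rw [ih _ hdw_len hdw_pair]
        rw [pvEqPairs_cons]
        have harith :
            ((((t.takeWhile (fun y => y == x)).length + 1).choose 2 : Nat) : Int)
              = PySem.Int.floordiv
                  ((1 + ((t.takeWhile (fun y => y == x)).length : Int))
                    * (1 + ((t.takeWhile (fun y => y == x)).length : Int) - 1)) 2 := by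
          set K := (t.takeWhile (fun y => y == x)).length with hK
          rw [PySem.Int.floordiv_eq_ediv_of_pos (by norm_num)]
          rw [show (1 + (K : Int)) * (1 + (K : Int) - 1) = (((K + 1) * K : Nat) : Int) by
            push_cast; ring]
          rw [show (2 : Int) = ((2 : Nat) : Int) by norm_num]
          rw [← Int.natCast_ediv]
          congr 1
          rw [Nat.choose_two_right]
          simp
        rw [harith]

theorem pvFoldl_min_init :
    ∀ (t : List Int) (c x : Int), t.foldl min (min c x) = min c (t.foldl min x)
  | [], _, _ => rfl
  | a :: t, c, x => by
      rw [List.foldl_cons, List.foldl_cons, min_assoc, pvFoldl_min_init t c (min x a)]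

theorem pvIf_min (acc d : Int) : (if d < acc then d else acc) = min acc d := by
  rw [min_def]
  split_ifs <;> omega

-- central characterization of both ports on the sorted prefix (n ≥ 2, n ≤ len)
theorem pvChar (n : Int) (a : List Int) (hn : 2 ≤ n) (hna : n ≤ (a.length : Int)) :
    ∃ (b G : List Int) (M A2 : Int),
      (List.IsChain (fun x y => x + 1000000 < y)
          ((PySem.List.sorted a (fun x => x) false).take n.toNat)
        ↔ ∀ g ∈ G, 1000000 < g) ∧
      (∀ g ∈ G, M ≤ g) ∧ M ∈ G ∧ (∀ g ∈ G, 0 ≤ g) ∧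
      (pvPairCount 0 b = pvEqPairs b) ∧
      (0 < M → pvPairCount M b = (G.count M : Int)) ∧
      (1000000 < M → pvPairCount 1000000 b = 0) ∧
      TowTuple n a = (pvPairCount (min 1000000 M) b, A2) ∧
      TowTuple_alt n a = ((if 0 < M then (G.count M : Int) else pvEqPairs b), A2) := by
  set s : List Int := PySem.List.sorted a (fun x => x) false with hs
  have hslen : s.length = a.length := PySem.List.length_sorted a _ false
  have hsp : s.Pairwise (· ≤ ·) := by
    have := PySem.List.sorted_pairwise a (fun x => x)
    rw [← hs] at this
    exact this
  have hN : (n.toNat : Int) = n := Int.toNat_of_nonneg (by omega)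
  have hNs : n.toNat ≤ s.length := by omega
  set b : List Int := s.take n.toNat with hb
  have hblen : b.length = n.toNat := by rw [hb, List.length_take]; omega
  have hnb : n = (b.length : Int) := by omega
  have hb0 : 0 < b.length := by omega
  have hbp : b.Pairwise (· ≤ ·) := List.Pairwise.sublist (List.take_sublist _ _) hsp
  have hlast_lt : b.length - 1 < b.length := by omega
  have hbcons : b = b[0]'hb0 :: b.drop 1 := by
    have h := List.getElem_cons_drop hb0
    rw [List.drop_zero] at h
    exact h.symm
  set x0 : Int := b[0]'hb0 with hx0d
  set xl : Int := b[b.length - 1]'hlast_lt with hxld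
  have hd1 : 0 < (b.drop 1).length := by simp; omega
  obtain ⟨y0, t0, hdt⟩ : ∃ y0 t0, b.drop 1 = y0 :: t0 := by
    cases hdd : b.drop 1 with
    | nil => rw [hdd] at hd1; simp at hd1
    | cons y r => exact ⟨y, r, rfl⟩
  set G : List Int := pvDiffs (x0) (b.drop 1) with hG
  have hGcons : G = (y0 - x0) :: pvDiffs y0 t0 := by rw [hG, hdt]; rfl
  set M : Int := List.foldl min (y0 - x0) (pvDiffs y0 t0) with hM
  have hMle : ∀ g ∈ G, M ≤ g := by
    intro g hg
    rw [hGcons] at hg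
    have hfm := PySem.List.foldl_min_le (pvDiffs y0 t0) (y0 - x0)
    rcases List.mem_cons.mp hg with rfl | hg'
    · exact hfm.1
    · exact hfm.2 g hg'
  have hMmem : M ∈ G := by
    rw [hGcons]
    rcases PySem.List.foldl_min_mem (pvDiffs y0 t0) (y0 - x0) with h | h
    · rw [hM, h]; exact List.mem_cons_self
    · exact List.mem_cons_of_mem _ h
  have hG0 : ∀ g ∈ G, 0 ≤ g := by
    intro g hg
    refine pvDiffs_nonneg (b.drop 1) (x0) ?_ g hg
    rw [← hbcons]
    exact hbp
  have hchain : List.IsChain (fun x y => x + 1000000 < y) (s.take n.toNat)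
      ↔ ∀ g ∈ G, 1000000 < g := by
    rw [← hb]
    conv_lhs => rw [hbcons]
    exact pvChain_iff (b.drop 1) (x0)
  have hz : pvPairCount 0 b = pvEqPairs b := pvEqPairs_eq_aux b.length b le_rfl hbp
  have hpos : 0 < M → pvPairCount M b = (G.count M : Int) := by
    intro hMp
    conv_lhs => rw [hbcons]
    rw [pvPairCount_pos M hMp (b.drop 1) (x0) (fun g hg => hMle g hg), hG]
  have hbig : 1000000 < M → pvPairCount 1000000 b = 0 := by
    intro hM6
    conv_lhs => rw [hbcons]
    rw [pvPairCount_pos 1000000 (by norm_num) (b.drop 1) (x0)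
      (fun g hg => le_trans (by omega) (hMle g hg))]
    rw [show ((pvDiffs (x0) (b.drop 1)).count 1000000 : Int) = ((G.count 1000000 : Nat) : Int) by rw [hG]]
    rw [List.count_eq_zero.mpr (fun hmem => by have := hMle 1000000 hmem; omega)]
    norm_num
  -- index congruence between the full sorted list and its prefix b
  have hcong : ∀ i : Int, 0 ≤ i → i < (b.length : Int) →
      PySem.List.pyGetD s i 0 = PySem.List.pyGetD b i 0 := by
    intro i h0 h1
    rw [hb]
    exact (pvGetD_take s n.toNat i h0 (by omega) hNs).symm
  have hx0 : PySem.List.pyGetD b 0 0 = x0 := by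
    have := pvGetD_nat b 0 hb0
    simpa using this
  have hlastb : PySem.List.pyGetD b (-1) 0 = xl := pvGetD_neg_one b hb0
  -- the gaps list of the prefix is G
  have hgaps : (PySem.List.pyRange 1 (b.length : Int) 1).map
      (fun i => PySem.List.pyGetD b i 0 - PySem.List.pyGetD b (i - 1) 0) = G := by
    have h := pvMap_range_diffs b (b.length - 1) 0 hb0 (by omega)
    norm_num at h
    rw [← List.drop_one] at h
    rw [← hG] at h
    exact h
  -- characterize minA
  have hminA : pvEqRun s (PySem.List.pyGetD s 0 0)
      (PySem.List.pyRange 1 (b.length : Int) 1) 1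
        = (b.count (PySem.List.pyGetD b 0 0) : Int) := by
    rw [hcong 0 le_rfl (by omega)]
    rw [pvEqRun_congr s b _ (PySem.List.pyRange 1 (b.length : Int) 1) 1 (fun i hi => by
      rw [PySem.List.mem_pyRange_one] at hi
      exact hcong i (by omega) hi.2)]
    have he := pvEqRun_fwd b (PySem.List.pyGetD b 0 0) (b.length - 1) 1 1 (by omega)
    rw [show ((1 : Nat) : Int) = 1 by norm_num] at he
    rw [he, hx0]
    have hpc : (b.drop 1).Pairwise (· ≤ ·) ∧ ∀ z ∈ b.drop 1, x0 ≤ z := by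
      have h := hbp
      rw [hbcons, List.pairwise_cons] at h
      exact ⟨h.2, h.1⟩
    have hcnt : b.count (x0)
        = 1 + ((b.drop 1).takeWhile (fun y => y == x0)).length := by
      conv_lhs => rw [hbcons]
      rw [List.count_cons_self, pvCount_run_le _ _ hpc.1 hpc.2]
      omega
    rw [hcnt]
    push_cast
    ring
  -- characterize maxA
  have hvlast : PySem.List.pyGetD b ((b.length : Int) - 1) 0 = xl := by
    rw [show ((b.length : Int) - 1) = ((b.length - 1 : Nat) : Int) by omega]
    exact pvGetD_nat b (b.length - 1) hlast_lt
  have hdropl : b.drop (b.length - 1) = [xl] := by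
    rw [← List.getElem_cons_drop hlast_lt]
    rw [show b.length - 1 + 1 = b.length by omega, List.drop_length]
  have hsplit : b = b.take (b.length - 1) ++ [xl] := by
    conv_lhs => rw [← List.take_append_drop (b.length - 1) b]
    rw [hdropl]
  have hmaxA : pvEqRun s (PySem.List.pyGetD s ((b.length : Int) - 1) 0)
      (PySem.List.pyRange ((b.length : Int) - 2) (-1) (-1)) 1
        = (b.count (PySem.List.pyGetD b (-1) 0) : Int) := by
    rw [hcong ((b.length : Int) - 1) (by omega) (by omega)]
    rw [pvEqRun_congr s b _ _ 1 (fun i hi => by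
      rw [PySem.List.mem_pyRange_neg_one] at hi
      exact hcong i (by omega) (by omega))]
    rw [show ((b.length : Int) - 2) = ((b.length - 2 : Nat) : Int) by omega]
    have he := pvEqRun_bwd b (PySem.List.pyGetD b ((b.length : Int) - 1) 0) (b.length - 2) 1
      (by omega)
    rw [he]
    rw [show b.length - 2 + 1 = b.length - 1 by omega]
    rw [hlastb, hvlast]
    have hrevpair : ((b.take (b.length - 1)).reverse).Pairwise (fun a b => b ≤ a) := by
      rw [List.pairwise_reverse]
      exact List.Pairwise.sublist (List.take_sublist _ _) hbp
    have hrevle : ∀ y ∈ (b.take (b.length - 1)).reverse, y ≤ xl := by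
      intro y hy
      rw [List.mem_reverse] at hy
      have h2 := hbp
      rw [hsplit, List.pairwise_append] at h2
      exact h2.2.2 y hy _ (by simp)
    have hcnt : b.count (xl)
        = 1 + (((b.take (b.length - 1)).reverse).takeWhile
            (fun y => y == xl)).length := by
      conv_lhs => rw [hsplit]
      rw [List.count_append]
      rw [← List.count_reverse (l := b.take (b.length - 1))]
      rw [pvCount_run_ge _ _ hrevpair hrevle]
      simp
      omega
    rw [hcnt]
    push_cast
    ring
  -- characterize minDiffer
  have hMd : (PySem.List.pyRange 1 (b.length : Int) 1).foldl
      (fun acc i =>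
        if PySem.List.pyGetD s i 0 - PySem.List.pyGetD s (i - 1) 0 < acc then
          PySem.List.pyGetD s i 0 - PySem.List.pyGetD s (i - 1) 0
        else acc) 1000000 = min 1000000 M := by
    rw [PySem.List.foldl_congr_mem _ _
      (fun acc i => min acc (PySem.List.pyGetD b i 0 - PySem.List.pyGetD b (i - 1) 0)) _
      (fun acc i hi => by
        rw [PySem.List.mem_pyRange_one] at hi
        rw [hcong i (by omega) hi.2, hcong (i - 1) (by omega) (by omega)]
        exact pvIf_min acc _)]
    rw [← List.foldl_map
      (f := fun i => PySem.List.pyGetD b i 0 - PySem.List.pyGetD b (i - 1) 0) (g := min)]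
    rw [hgaps, hGcons, List.foldl_cons, pvFoldl_min_init, ← hM]
  -- characterize the double loop
  have houter : List.foldl
      (fun acc i => pvInner s (min 1000000 M) i
        (PySem.List.pyRange (i + 1) (b.length : Int) 1) acc) 0
      (PySem.List.pyRange 0 (b.length : Int) 1)
        = pvPairCount (min 1000000 M) b := by
    rw [PySem.List.foldl_congr_mem _ _
      (fun acc i => pvInner b (min 1000000 M) i
        (PySem.List.pyRange (i + 1) (b.length : Int) 1) acc) 0
      (fun acc i hi => by
        rw [PySem.List.mem_pyRange_one] at hi
        refine pvInner_congr s b _ i (hcong i hi.1 hi.2) _ acc (fun j hj => by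
          rw [PySem.List.mem_pyRange_one] at hj
          exact hcong j (by omega) hj.2))]
    have ho := pvOuter_char b (min 1000000 M) hbp b.length 0 0 (by omega)
    norm_num at ho
    exact ho
  refine ⟨b, G, M,
    (b.count (PySem.List.pyGetD b 0 0) : Int) * (b.count (PySem.List.pyGetD b (-1) 0) : Int),
    hchain, hMle, hMmem, hG0, hz, hpos, hbig, ?_, ?_⟩
  · -- TowTuple
    simp only [TowTuple]
    rw [← hs, hnb, hminA, hmaxA, hMd, houter]
  · -- TowTuple_alt
    simp only [TowTuple_alt]
    rw [← hs]
    rw [if_neg (by omega : ¬ n < 2)]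
    rw [PySem.List.slice_to s (by omega : (0 : Int) ≤ n), ← hb, hnb, hgaps]
    conv_lhs => rw [hGcons]
    rw [PySem.List.min?_id_cons, Option.getD_some, ← hM, ← hGcons]

theorem pvSmall (n : Int) (a : List Int) (hn2 : n < 2) : TowTuple n a = TowTuple_alt n a := by
  have h1 : PySem.List.pyRange 1 n 1 = [] := PySem.List.pyRange_one_eq_nil (by omega)
  have h2 : PySem.List.pyRange (n - 2) (-1) (-1) = [] :=
    PySem.List.pyRange_neg_one_eq_nil (by omega)
  simp only [TowTuple, TowTuple_alt, if_pos hn2, h1, h2]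
  by_cases hn0 : n ≤ 0
  · rw [PySem.List.pyRange_one_eq_nil hn0]
    simp [pvEqRun]
  · have hn1 : n = 1 := by omega
    subst hn1
    have h3 : PySem.List.pyRange 0 1 1 = [0] := by decide
    simp [pvEqRun, pvInner, h3]

theorem pvMain (n : Int) (a : List Int) (hpre : Pre_TowTuple n a) (hnd : ¬ D_TowTuple n a) :
    TowTuple n a = TowTuple_alt n a := by
  by_cases hn2 : n < 2
  · exact pvSmall n a hn2
  · have hn : 2 ≤ n := by omega
    have hna : n ≤ (a.length : Int) := by
      rcases hpre with h | h
      · exact h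
      · omega
    obtain ⟨b, G, M, A2, hchain, hMle, hMmem, hG0, hz, hpos, _, hA, hB⟩ := pvChar n a hn hna
    rw [hA, hB]
    have hM0 : 0 ≤ M := hG0 M hMmem
    obtain ⟨g, hgmem, hgle⟩ : ∃ g ∈ G, g ≤ 1000000 := by
      by_contra hno
      exact hnd ⟨hn, hchain.mpr (fun g hg => by
        by_contra hlt
        exact hno ⟨g, hg, by omega⟩)⟩
    have hMle6 : M ≤ 1000000 := le_trans (hMle g hgmem) hgle
    rw [min_eq_right hMle6]
    by_cases hMpos : 0 < M
    · rw [if_pos hMpos, hpos hMpos]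
    · have : M = 0 := by omega
      rw [if_neg hMpos, this, hz]

theorem pvTight (n : Int) (a : List Int) (hpre : Pre_TowTuple n a) (hd : D_TowTuple n a) :
    TowTuple n a ≠ TowTuple_alt n a := by
  obtain ⟨hn, hch⟩ := hd
  have hna : n ≤ (a.length : Int) := by
    rcases hpre with h | h
    · exact h
    · omega
  obtain ⟨b, G, M, A2, hchain, hMle, hMmem, _, _, _, hbig, hA, hB⟩ := pvChar n a hn hna
  have hall : ∀ g ∈ G, 1000000 < g := hchain.mp hch
  have hM6 : 1000000 < M := hall M hMmem
  rw [hA, hB, min_eq_left (by omega)]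
  rw [if_pos (by omega : (0 : Int) < M)]
  intro heq
  have h1 : pvPairCount 1000000 b = (G.count M : Int) := congrArg Prod.fst heq
  rw [hbig hM6] at h1
  have : 0 < G.count M := List.count_pos_iff.mpr hMmem
  omega

-- ===== VERDICT (by name: the statement is the Claim_ definition above) =====
theorem TowTuple_spec : Claim_unchanged_TowTuple := by
  intro n a _ hpre hnd
  exact pvMain n a hpre hnd

theorem TowTuple_changed : Claim_changed_TowTuple := by
  unfold Claim_changed_TowTuple; decide

theorem TowTuple_tight : Claim_exact_TowTuple := by
  intro n a _ hpre hd
  exact pvTight n a hpre hd
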